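-- pv_equiv track=rewrite | github.com/ClientFromHell/stepik | inheritance.py | bfs
-- ===== SOURCE A (Python) =====
-- def bfs(visited, graph, node):
--     visited.append(node)
--     for i in graph[node]:
--         if i in graph:
--             bfs(visited, graph, i)
--         else:
--             visited.append(i)
--     return visited
-- ===== SOURCE B (Python) =====
-- def bfs(visited, graph, node):
--     # Iterative re-implementation: explicit stack instead of recursion.
--     # Like A, it mutates `visited` in place (appends) and returns it, and like A
--     # it looks the start node up in graph unconditionally (the root must be a key).
--     visited.append(node)
--     stack = list(reversed(graph[node]))
--     while stack:
--         cur = stack.pop()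
--         visited.append(cur)
--         if cur in graph:
--             stack.extend(reversed(graph[cur]))
--     return visited
-- ===== Notes on version B (the rewrite author's own statement) =====
-- stated objective: alternative
-- what changed: Replaces A's recursion with an explicit LIFO stack loop (children pushed in reversed order), producing the same pre-order expansion without recursive calls.
import Mathlib
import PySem

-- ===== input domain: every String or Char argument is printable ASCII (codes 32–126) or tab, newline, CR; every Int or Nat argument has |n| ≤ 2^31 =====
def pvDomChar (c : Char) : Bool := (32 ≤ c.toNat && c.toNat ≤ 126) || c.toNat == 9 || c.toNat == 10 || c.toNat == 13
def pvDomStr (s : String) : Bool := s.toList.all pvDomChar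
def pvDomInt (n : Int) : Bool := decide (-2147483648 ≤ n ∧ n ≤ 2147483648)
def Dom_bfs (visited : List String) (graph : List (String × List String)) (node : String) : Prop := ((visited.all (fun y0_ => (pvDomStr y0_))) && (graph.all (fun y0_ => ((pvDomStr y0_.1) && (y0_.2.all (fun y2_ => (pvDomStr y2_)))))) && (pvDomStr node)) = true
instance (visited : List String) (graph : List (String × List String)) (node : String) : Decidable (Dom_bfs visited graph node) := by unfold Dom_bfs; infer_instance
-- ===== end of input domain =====

-- B replaces A's recursion by an explicit stack loop; equivalence is about the
-- returned list (both Pythons also mutate `visited` in place, with identical appends).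

-- ===== PORT A =====
-- dict lookup on the association list (Python dict: keys unique, first match)
def pvGet (graph : List (String × List String)) (s : String) : Option (List String) :=
  match graph with
  | [] => none
  | (k, v) :: t => if k = s then some v else pvGet t s

-- `i in graph`
def pvKey (graph : List (String × List String)) (s : String) : Bool :=
  (pvGet graph s).isSome

-- literal port of A's recursion; the fuel argument only makes it total, Pre_bfs
-- guarantees it is never exhausted (Python A diverges / raises outside Pre_bfs)
def bfsRec (graph : List (String × List String)) : Nat → List String → String → List String
  | 0, visited, _ => visited
  | f + 1, visited, node =>
    let visited := visited ++ [node]          -- visited.append(node)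
    match pvGet graph node with
    | none => visited                          -- Python: KeyError (excluded by Pre_bfs)
    | some cs =>                               -- for i in graph[node]: ...
      cs.foldl (fun v i => if pvKey graph i then bfsRec graph f v i else v ++ [i]) visited

def bfs (visited : List String) (graph : List (String × List String)) (node : String) : List String :=
  bfsRec graph graph.length visited node

-- ===== PORT B =====
-- max children-list length, used only to size the totality fuel of the loop
def pvMaxCh (graph : List (String × List String)) : Nat :=
  graph.foldl (fun m p => max m p.2.length) 0

-- literal port of B's while-loop; the stack is kept top-at-head, which mirrors
-- Python's end-of-list top exactly: `stack.extend(reversed(graph[cur]))` + `pop()`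
-- = prepend `cs` and pop the head.  Fuel only for totality (one unit per pop).
def bfsLoop (graph : List (String × List String)) : Nat → List String → List String → List String
  | 0, visited, _ => visited
  | _ + 1, visited, [] => visited
  | f + 1, visited, cur :: rest =>
    let visited := visited ++ [cur]            -- visited.append(cur)
    match pvGet graph cur with
    | some cs => bfsLoop graph f visited (cs ++ rest)
    | none => bfsLoop graph f visited rest

def bfs_alt (visited : List String) (graph : List (String × List String)) (node : String) : List String :=
  let visited := visited ++ [node]           -- visited.append(node)
  match pvGet graph node with
  | none => visited                           -- Python: KeyError on graph[node] (excluded by Pre_bfs)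
  | some cs => bfsLoop graph ((pvMaxCh graph + 1) ^ graph.length) visited cs

-- ===== PRECONDITION & SPEC =====
-- Kahn-style layering: pvElim graph m = keys all of whose key-children are
-- eliminated within m-1 rounds (a closed-form acyclicity/shape check, not a run
-- of either port).
-- Pre_-side views of the graph, written with library list functions only
-- (k's children = value of the first pair keyed k; a key = member of the key list)
def pvIsKey (graph : List (String × List String)) (s : String) : Bool :=
  (graph.map Prod.fst).contains s

def pvChildren (graph : List (String × List String)) (s : String) : List String :=
  ((graph.find? (fun p => p.1 == s)).map Prod.snd).getD []

def pvElim (graph : List (String × List String)) : Nat → List String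
  | 0 => []
  | m + 1 => (graph.map Prod.fst).filter
      (fun k => ((pvChildren graph k).filter (pvIsKey graph)).all (fun i => i ∈ pvElim graph m))

-- Pre_bfs excludes exactly the inputs where Python A does not return: the start
-- node is not a key (KeyError) or a cycle of keys is reachable from it
-- (unbounded recursion).
def Pre_bfs (visited : List String) (graph : List (String × List String)) (node : String) : Prop :=
  node ∈ pvElim graph graph.length

instance (visited : List String) (graph : List (String × List String)) (node : String) : Decidable (Pre_bfs visited graph node) := by unfold Pre_bfs; infer_instance

def pvWitness_bfs : List String × (List (String × List String)) × String :=
  (["z"], [("a", ["b", "c"]), ("b", [])], "a")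

def Spec_bfs (visited : List String) (graph : List (String × List String)) (node : String) (out : List String) : Prop := out = bfs_alt visited graph node
instance (visited : List String) (graph : List (String × List String)) (node : String) (out : List String) : Decidable (Spec_bfs visited graph node out) := by unfold Spec_bfs; infer_instance

-- ===== CLAIM (what is proved, stated in full; the proofs are below) =====
def Claim_equal_bfs : Prop := ∀ (visited : List String) (graph : List (String × List String)) (node : String), Dom_bfs visited graph node → Pre_bfs visited graph node → Spec_bfs visited graph node (bfs visited graph node)

-- ===== LEMMAS AND PROOFS =====

-- emitted segment of A's recursion
def pvEm (graph : List (String × List String)) (f : Nat) (n : String) : List String :=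
  bfsRec graph f [] n

-- node expansion used to describe one stack entry's contribution
def pvE (graph : List (String × List String)) (n : String) : List String :=
  if pvKey graph n then pvEm graph graph.length n else [n]

theorem pvIsKey_eq_pvKey (graph : List (String × List String)) :
    pvIsKey graph = pvKey graph := by
  funext s
  induction graph with
  | nil => rfl
  | cons p t ih =>
    by_cases hk : p.1 = s
    · have hb : (s == p.1) = true := by simp [hk]
      simp [pvIsKey, pvKey, pvGet, hk]
    · have hb : (s == p.1) = false := by simp; exact fun h => hk h.symm
      simp only [pvIsKey, List.map_cons, List.contains_cons, hb, Bool.false_or]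
      simp only [pvKey, pvGet, if_neg hk]
      exact ih

theorem pvChildren_eq_pvGet (graph : List (String × List String)) (s : String) :
    pvChildren graph s = (pvGet graph s).getD [] := by
  induction graph with
  | nil => rfl
  | cons p t ih =>
    by_cases hk : p.1 = s
    · have hb : (p.1 == s) = true := by simp [hk]
      simp [pvChildren, pvGet, hk]
    · have hb : (p.1 == s) = false := by simpa using hk
      simp only [pvChildren, pvGet, List.find?_cons, hb, if_neg hk]
      exact ih

theorem pvGet_isSome_mem {graph : List (String × List String)} {n : String}
    (h : n ∈ graph.map Prod.fst) : (pvGet graph n).isSome := by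
  induction graph with
  | nil => simp at h
  | cons p t ih =>
    simp only [List.map_cons, List.mem_cons] at h
    by_cases hk : p.1 = n
    · simp [pvGet, hk]
    · rcases h with h | h
      · exact absurd h.symm hk
      · simpa [pvGet, hk] using ih h

theorem pvGet_mem {graph : List (String × List String)} {n : String} {cs : List String}
    (h : pvGet graph n = some cs) : (n, cs) ∈ graph := by
  induction graph with
  | nil => simp [pvGet] at h
  | cons p t ih =>
    by_cases hk : p.1 = n
    · obtain ⟨k, v⟩ := p
      simp only at hk
      subst hk
      simp [pvGet] at h
      subst h
      exact List.mem_cons_self ..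
    · simp only [pvGet, hk, if_false] at h
      exact List.mem_cons_of_mem _ (ih h)

theorem pvFoldlMax_base (t : List (String × List String)) :
    ∀ (b : Nat), b ≤ t.foldl (fun m r => max m r.2.length) b := by
  induction t with
  | nil => intro b; simp
  | cons u s ih =>
    intro b
    simp only [List.foldl_cons]
    exact le_trans (le_max_left _ _) (ih _)

theorem pvMaxCh_mem {graph : List (String × List String)} {p : String × List String}
    (h : p ∈ graph) : p.2.length ≤ pvMaxCh graph := by
  have key : ∀ (l : List (String × List String)) (a : Nat) (q : String × List String), q ∈ l →
      q.2.length ≤ l.foldl (fun m r => max m r.2.length) a := by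
    intro l
    induction l with
    | nil => intro a q hq; simp at hq
    | cons r t ih =>
      intro a q hq
      have hbase := pvFoldlMax_base t
      simp only [List.foldl_cons]
      rcases List.mem_cons.1 hq with hq | hq
      · subst hq
        exact le_trans (le_max_right a q.2.length) (hbase _)
      · exact ih _ q hq
  exact key graph 0 p h

theorem bfsRec_acc (graph : List (String × List String)) :
    ∀ (f : Nat) (n : String) (v : List String),
      bfsRec graph f v n = v ++ bfsRec graph f [] n := by
  intro f
  induction f with
  | zero => intro n v; simp [bfsRec]
  | succ f ih =>
    intro n v
    have pull : ∀ (cs : List String) (a b : List String),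
        cs.foldl (fun v i => if pvKey graph i then bfsRec graph f v i else v ++ [i]) (a ++ b)
          = a ++ cs.foldl (fun v i => if pvKey graph i then bfsRec graph f v i else v ++ [i]) b := by
      intro cs
      induction cs with
      | nil => intro a b; simp
      | cons c t iht =>
        intro a b
        simp only [List.foldl_cons]
        by_cases hk : pvKey graph c
        · rw [if_pos hk, if_pos hk, ih c (a ++ b), ih c b, List.append_assoc]
          exact iht a (b ++ bfsRec graph f [] c)
        · rw [if_neg hk, if_neg hk, List.append_assoc]
          exact iht a (b ++ [c])
    cases h : pvGet graph n with
    | none => simp [bfsRec, h]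
    | some cs =>
      simp only [bfsRec, h]
      have : v ++ [n] = v ++ ([] ++ [n]) := by simp
      rw [this, pull]

theorem pvEm_unfold {graph : List (String × List String)} {n : String} {cs : List String}
    (f : Nat) (h : pvGet graph n = some cs) :
    pvEm graph (f + 1) n
      = n :: cs.flatMap (fun i => if pvKey graph i then pvEm graph f i else [i]) := by
  unfold pvEm
  simp only [bfsRec, h, List.nil_append]
  have hf : (fun (v : List String) (i : String) => if pvKey graph i then bfsRec graph f v i else v ++ [i])
      = fun v i => v ++ (if pvKey graph i then bfsRec graph f [] i else [i]) := by
    funext v i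
    by_cases hk : pvKey graph i
    · simp [hk, bfsRec_acc graph f i v]
    · simp [hk]
  rw [hf, PySem.List.foldl_append_eq_flatMap]
  simp

theorem pvElim_sub_keys {graph : List (String × List String)} {m : Nat} {n : String}
    (h : n ∈ pvElim graph m) : n ∈ graph.map Prod.fst := by
  cases m with
  | zero => simp [pvElim] at h
  | succ m => exact List.mem_of_mem_filter h

theorem pvElim_key {graph : List (String × List String)} {m : Nat} {n : String}
    (h : n ∈ pvElim graph m) : pvKey graph n := pvGet_isSome_mem (pvElim_sub_keys h)

theorem pvElim_succ {graph : List (String × List String)} {m : Nat} {n : String} {cs : List String}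
    (h : n ∈ pvElim graph (m + 1)) (hg : pvGet graph n = some cs) :
    ∀ i ∈ cs, pvKey graph i → i ∈ pvElim graph m := by
  have := List.of_mem_filter h
  simp only [pvChildren_eq_pvGet, pvIsKey_eq_pvKey, hg, Option.getD_some, List.all_eq_true,
    decide_eq_true_eq] at this
  intro i hi hk
  exact this i (List.mem_filter.2 ⟨hi, hk⟩)

theorem pvElim_mono {graph : List (String × List String)} :
    ∀ {m : Nat} {n : String}, n ∈ pvElim graph m → n ∈ pvElim graph (m + 1) := by
  intro m
  induction m with
  | zero => intro n h; simp [pvElim] at h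
  | succ m ih =>
    intro n h
    have hk := List.mem_of_mem_filter h
    cases hg : pvGet graph n with
    | none =>
      have hks := pvGet_isSome_mem hk
      rw [hg] at hks
      simp at hks
    | some cs =>
      refine List.mem_filter.2 ⟨hk, ?_⟩
      simp only [pvChildren_eq_pvGet, pvIsKey_eq_pvKey, hg, Option.getD_some, List.all_eq_true,
        decide_eq_true_eq]
      intro i hi
      have hik : pvKey graph i := (List.mem_filter.1 hi).2
      exact ih (pvElim_succ h hg i (List.mem_filter.1 hi).1 hik)

-- fuel-insensitivity of A's recursion above the node's elimination level
theorem pvEm_ins {graph : List (String × List String)} :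
    ∀ (m : Nat) (n : String) (f₁ f₂ : Nat), n ∈ pvElim graph m → m ≤ f₁ → m ≤ f₂ →
      pvEm graph f₁ n = pvEm graph f₂ n := by
  intro m
  induction m with
  | zero => intro n f₁ f₂ h; simp [pvElim] at h
  | succ m ih =>
    intro n f₁ f₂ h h1 h2
    cases hg : pvGet graph n with
    | none => exact absurd (pvElim_key h) (by simp [pvKey, hg])
    | some cs =>
      obtain ⟨f₁', rfl⟩ : ∃ f, f₁ = f + 1 := ⟨f₁ - 1, by omega⟩
      obtain ⟨f₂', rfl⟩ : ∃ f, f₂ = f + 1 := ⟨f₂ - 1, by omega⟩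
      rw [pvEm_unfold f₁' hg, pvEm_unfold f₂' hg]
      congr 1
      apply List.flatMap_congr   -- pointwise equality on members
      intro i hi
      by_cases hk : pvKey graph i
      · simp only [if_pos hk]
        exact ih i f₁' f₂' (pvElim_succ h hg i hi hk) (by omega) (by omega)
      · simp [hk]

theorem pvEm_len {graph : List (String × List String)} :
    ∀ (f : Nat) (n : String), (pvEm graph f n).length ≤ (pvMaxCh graph + 1) ^ f := by
  intro f
  induction f with
  | zero => intro n; simp [pvEm, bfsRec]
  | succ f ih =>
    intro n
    have hpow : 1 ≤ (pvMaxCh graph + 1) ^ f := Nat.one_le_pow _ _ (by omega)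
    cases hg : pvGet graph n with
    | none =>
      have : pvEm graph (f + 1) n = [n] := by simp [pvEm, bfsRec, hg]
      rw [this]
      calc (1:Nat) ≤ (pvMaxCh graph + 1) ^ f := hpow
        _ ≤ (pvMaxCh graph + 1) ^ (f + 1) := Nat.pow_le_pow_right (by omega) (by omega)
    | some cs =>
      rw [pvEm_unfold f hg]
      have hcs : cs.length ≤ pvMaxCh graph := pvMaxCh_mem (pvGet_mem hg)
      have hflat : ∀ l : List String,
          (l.flatMap (fun i => if pvKey graph i then pvEm graph f i else [i])).length
            ≤ l.length * (pvMaxCh graph + 1) ^ f := by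
        intro l
        induction l with
        | nil => simp
        | cons c t iht =>
          simp only [List.flatMap_cons, List.length_append, List.length_cons]
          have hc : (if pvKey graph c then pvEm graph f c else [c]).length
              ≤ (pvMaxCh graph + 1) ^ f := by
            by_cases hk : pvKey graph c
            · simpa [hk] using ih c
            · simpa [hk] using hpow
          calc (if pvKey graph c then pvEm graph f c else [c]).length
                + (t.flatMap (fun i => if pvKey graph i then pvEm graph f i else [i])).length
              ≤ (pvMaxCh graph + 1) ^ f + t.length * (pvMaxCh graph + 1) ^ f :=
                Nat.add_le_add hc iht
            _ = (t.length + 1) * (pvMaxCh graph + 1) ^ f := by ring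
      have := hflat cs
      simp only [List.length_cons]
      have hstep : cs.length * (pvMaxCh graph + 1) ^ f + 1 ≤ (pvMaxCh graph + 1) ^ (f + 1) := by
        have : cs.length * (pvMaxCh graph + 1) ^ f ≤ pvMaxCh graph * (pvMaxCh graph + 1) ^ f :=
          Nat.mul_le_mul_right _ hcs
        calc cs.length * (pvMaxCh graph + 1) ^ f + 1
            ≤ pvMaxCh graph * (pvMaxCh graph + 1) ^ f + (pvMaxCh graph + 1) ^ f :=
              Nat.add_le_add this hpow
          _ = (pvMaxCh graph + 1) ^ (f + 1) := by ring
      omega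

theorem bfsLoop_acc (graph : List (String × List String)) :
    ∀ (f : Nat) (st v : List String),
      bfsLoop graph f v st = v ++ bfsLoop graph f [] st := by
  intro f
  induction f with
  | zero => intro st v; simp [bfsLoop]
  | succ f ih =>
    intro st v
    cases st with
    | nil => simp [bfsLoop]
    | cons cur rest =>
      cases hg : pvGet graph cur with
      | some cs =>
        simp only [bfsLoop, hg]
        rw [ih (cs ++ rest) (v ++ [cur]), ih (cs ++ rest) ([] ++ [cur])]; simp
      | none =>
        simp only [bfsLoop, hg]
        rw [ih rest (v ++ [cur]), ih rest ([] ++ [cur])]; simp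

theorem pvE_ne_nil {graph : List (String × List String)} {n : String}
    (hinv : pvKey graph n → n ∈ pvElim graph graph.length) : pvE graph n ≠ [] := by
  by_cases hk : pvKey graph n
  · have hmem := hinv hk
    have : graph.length ≠ 0 := by
      intro h0
      rw [h0] at hmem
      simp [pvElim] at hmem
    obtain ⟨m, hm⟩ : ∃ m, graph.length = m + 1 := ⟨graph.length - 1, by omega⟩
    cases hg : pvGet graph n with
    | none => exact absurd hk (by simp [pvKey, hg])
    | some cs =>
      simp only [pvE, if_pos hk, hm, pvEm_unfold m hg]
      exact List.cons_ne_nil _ _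
  · simp [pvE, hk]

-- a key's expansion is itself followed by its children's expansions
theorem pvE_key {graph : List (String × List String)} {n : String} {cs : List String}
    (hmem : n ∈ pvElim graph graph.length) (hg : pvGet graph n = some cs) :
    pvE graph n = n :: cs.flatMap (pvE graph) := by
  have hk : pvKey graph n := by simp [pvKey, hg]
  obtain ⟨m, hm⟩ : ∃ m, graph.length = m + 1 := by
    refine ⟨graph.length - 1, ?_⟩
    have : graph.length ≠ 0 := by
      intro h0; rw [h0] at hmem; simp [pvElim] at hmem
    omega
  simp only [pvE, if_pos hk, hm, pvEm_unfold m hg]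
  congr 1
  apply List.flatMap_congr
  intro i hi
  by_cases hik : pvKey graph i
  · have hiel : i ∈ pvElim graph m := pvElim_succ (hm ▸ hmem) hg i hi hik
    simp only [pvE, if_pos hik, hm]
    exact pvEm_ins m i m (m + 1) hiel (le_refl _) (by omega)
  · simp [hik, pvE]

-- the stack loop computes the concatenation of the expansions of its stack entries
theorem bfsLoop_main {graph : List (String × List String)} :
    ∀ (f : Nat) (st : List String),
      (∀ n ∈ st, pvKey graph n → n ∈ pvElim graph graph.length) →
      (st.flatMap (pvE graph)).length ≤ f →
      bfsLoop graph f [] st = st.flatMap (pvE graph) := by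
  intro f
  induction f with
  | zero =>
    intro st hinv hlen
    have hst : st = [] := by
      cases st with
      | nil => rfl
      | cons c t =>
        exfalso
        have h1 := pvE_ne_nil (hinv c (List.mem_cons_self ..))
        simp only [List.flatMap_cons, List.length_append, Nat.le_zero] at hlen
        have : (pvE graph c).length = 0 := by omega
        exact h1 (List.eq_nil_of_length_eq_zero this)
    subst hst
    simp [bfsLoop]
  | succ f ih =>
    intro st hinv hlen
    cases st with
    | nil => simp [bfsLoop]
    | cons cur rest =>
      cases hg : pvGet graph cur with
      | none =>
        simp only [bfsLoop, hg]
        have hE : pvE graph cur = [cur] := by simp [pvE, pvKey, hg]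
        rw [bfsLoop_acc graph f rest ([] ++ [cur])]
        simp only [List.flatMap_cons, hE, List.nil_append]
        rw [ih rest (fun n hn => hinv n (List.mem_cons_of_mem _ hn)) ?_]
        simp only [List.flatMap_cons, hE] at hlen
        simp at hlen ⊢
        omega
      | some cs =>
        simp only [bfsLoop, hg]
        have hk : pvKey graph cur := by simp [pvKey, hg]
        have hmem : cur ∈ pvElim graph graph.length := hinv cur (List.mem_cons_self ..) hk
        obtain ⟨m, hm⟩ : ∃ m, graph.length = m + 1 := by
          refine ⟨graph.length - 1, ?_⟩
          have : graph.length ≠ 0 := by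
            intro h0; rw [h0] at hmem; simp [pvElim] at hmem
          omega
        have hsucc : ∀ i ∈ cs, pvKey graph i → i ∈ pvElim graph graph.length := by
          intro i hi hik
          rw [hm] at hmem ⊢
          exact pvElim_mono (pvElim_succ hmem hg i hi hik)
        have hEcur : pvE graph cur = cur :: cs.flatMap (pvE graph) := pvE_key hmem hg
        have hinv' : ∀ n ∈ cs ++ rest, pvKey graph n → n ∈ pvElim graph graph.length := by
          intro n hn
          rcases List.mem_append.1 hn with hn | hn
          · exact hsucc n hn
          · exact hinv n (List.mem_cons_of_mem _ hn)
        have hlen' : ((cs ++ rest).flatMap (pvE graph)).length ≤ f := by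
          have : (cur :: rest).flatMap (pvE graph)
              = cur :: (cs ++ rest).flatMap (pvE graph) := by
            simp only [List.flatMap_cons, hEcur, List.flatMap_append]
            simp
          rw [this] at hlen
          simpa using Nat.le_of_succ_le_succ hlen
        rw [bfsLoop_acc graph f (cs ++ rest) ([] ++ [cur]), ih (cs ++ rest) hinv' hlen']
        simp only [List.flatMap_cons, hEcur, List.flatMap_append]
        simp

-- ===== VERDICT (by name: the statement is the Claim_ definition above) =====
theorem bfs_spec : Claim_equal_bfs := by
  intro visited graph node _hdom hpre
  unfold Spec_bfs bfs bfs_alt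
  unfold Pre_bfs at hpre
  have hkey : pvKey graph node := pvElim_key hpre
  cases hg : pvGet graph node with
  | none => rw [pvKey, hg] at hkey; simp at hkey
  | some cs =>
    simp only
    have hsucc : ∀ i ∈ cs, pvKey graph i → i ∈ pvElim graph graph.length := by
      intro i hi hik
      obtain ⟨m, hm⟩ : ∃ m, graph.length = m + 1 := by
        refine ⟨graph.length - 1, ?_⟩
        have : graph.length ≠ 0 := by
          intro h0; rw [h0] at hpre; simp [pvElim] at hpre
        omega
      rw [hm] at hpre ⊢
      exact pvElim_mono (pvElim_succ hpre hg i hi hik)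
    have hEnode : pvE graph node = node :: cs.flatMap (pvE graph) := pvE_key hpre hg
    have hlen : (cs.flatMap (pvE graph)).length ≤ (pvMaxCh graph + 1) ^ graph.length := by
      have h1 : (pvE graph node).length ≤ (pvMaxCh graph + 1) ^ graph.length := by
        simpa [pvE, hkey] using pvEm_len graph.length node
      rw [hEnode] at h1
      simp only [List.length_cons] at h1
      omega
    rw [bfsLoop_acc graph _ cs (visited ++ [node]),
      bfsLoop_main _ cs hsucc hlen]
    have hA : bfsRec graph graph.length visited node = visited ++ pvE graph node := by
      rw [bfsRec_acc graph graph.length node visited]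
      simp [pvE, hkey, pvEm]
    rw [hA, hEnode]
    simp
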